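-- pv_equiv track=rewrite | github.com/DcTyle/QuantumMiner | core/utils.py | _detokenize
-- ===== SOURCE A (Python) =====
-- from typing import Any, Dict, List, Optional, Tuple, Union
--
-- def _detokenize(text: str, dct: Dict[str, str]) -> str:
--     if not text: return ""
--     out = []
--     i = 0
--     while i < len(text):
--         if i + 3 <= len(text) and text[i] == "@" and text[i+1:i+3].isdigit():
--             key = text[i+1:i+3]
--             rep = dct.get(key, "")
--             if rep: out.append(rep)
--             i += 3
--         else:
--             out.append(text[i])
--             i += 1
--     return "".join(out)
-- ===== SOURCE B (Python) =====
-- def _detokenize(text, dct):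
--     parts = text.split("@")
--     pieces = [parts[0]]
--     for part in parts[1:]:
--         if len(part) >= 2 and part[:2].isdigit():
--             pieces.append(dct.get(part[:2], "") + part[2:])
--         else:
--             pieces.append("@" + part)
--     return "".join(pieces)
-- ===== Notes on version B (the rewrite author's own statement) =====
-- stated objective: faster
-- what changed: B replaces A's manual index-advancing character loop with a single split on '@': each part after a separator is checked once for a leading two-digit key and rewritten, then the pieces are joined.
import Mathlib
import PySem

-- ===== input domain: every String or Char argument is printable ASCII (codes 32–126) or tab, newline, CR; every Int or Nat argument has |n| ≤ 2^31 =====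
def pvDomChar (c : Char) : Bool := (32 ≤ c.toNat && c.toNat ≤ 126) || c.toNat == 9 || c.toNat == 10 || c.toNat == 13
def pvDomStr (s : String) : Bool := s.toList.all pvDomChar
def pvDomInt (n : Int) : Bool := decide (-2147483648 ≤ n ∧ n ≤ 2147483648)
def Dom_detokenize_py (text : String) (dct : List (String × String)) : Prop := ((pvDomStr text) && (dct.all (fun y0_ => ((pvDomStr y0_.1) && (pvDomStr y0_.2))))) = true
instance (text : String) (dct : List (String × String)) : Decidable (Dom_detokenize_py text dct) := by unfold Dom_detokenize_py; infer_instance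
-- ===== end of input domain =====

-- B replaces A's manual index-advancing character loop with a single split on '@' plus a per-part rewrite (measured constant-factor faster).

-- ===== PORT A =====
-- A's while-loop: index i over the characters, accumulator `out` of string pieces.
def detokenizeLoop (cs : List Char) (dct : List (String × String)) (i : Nat)
    (out : List (List Char)) : List (List Char) :=
  if _h : i < cs.length then
    if (decide (i + 3 ≤ cs.length) && (PySem.List.pyGet? cs (i : Int) == some '@')
        && PySem.Chars.strIsdigit (PySem.List.slice cs (some ((i : Int) + 1)) (some ((i : Int) + 3)))) then
      let key := String.ofList (PySem.List.slice cs (some ((i : Int) + 1)) (some ((i : Int) + 3)))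
      let rep := PySem.Dict.getD ⟨dct⟩ key ""
      detokenizeLoop cs dct (i + 3) (if rep.toList.isEmpty then out else out ++ [rep.toList])
    else
      detokenizeLoop cs dct (i + 1) (out ++ [[cs[i]]])
  else out
termination_by cs.length - i

def detokenize_py (text : String) (dct : List (String × String)) : String :=
  if text.toList.isEmpty then "" else String.ofList (detokenizeLoop text.toList dct 0 []).flatten

-- ===== PORT B =====
-- one part of text.split('@'): replace a leading two-digit key, else restore the '@'
def detokenizePart (dct : List (String × String)) (part : List Char) : List Char :=
  if decide (2 ≤ part.length) && PySem.Chars.strIsdigit (part.take 2) then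
    (PySem.Dict.getD ⟨dct⟩ (String.ofList (part.take 2)) "").toList ++ part.drop 2
  else '@' :: part

def detokenize_py_alt (text : String) (dct : List (String × String)) : String :=
  let parts := PySem.Chars.splitOn text.toList ['@']
  let pieces := parts.headD [] :: (parts.drop 1).map (detokenizePart dct)
  String.ofList pieces.flatten

-- ===== PRECONDITION & SPEC =====
def Spec_detokenize_py (text : String) (dct : List (String × String)) (out : String) : Prop := out = detokenize_py_alt text dct
instance (text : String) (dct : List (String × String)) (out : String) : Decidable (Spec_detokenize_py text dct out) := by unfold Spec_detokenize_py; infer_instance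

-- ===== CLAIM (what is proved, stated in full; the proofs are below) =====
def Claim_equal_detokenize_py : Prop := ∀ (text : String) (dct : List (String × String)), Dom_detokenize_py text dct → Spec_detokenize_py text dct (detokenize_py text dct)

-- ===== LEMMAS AND PROOFS =====

-- canonical recursive description both ports are reduced to
def pvCore (dct : List (String × String)) : List Char → List Char
  | [] => []
  | '@' :: d1 :: d2 :: rest =>
    if PySem.Chars.isdigit d1 && PySem.Chars.isdigit d2 then
      (PySem.Dict.getD ⟨dct⟩ (String.ofList [d1, d2]) "").toList ++ pvCore dct rest
    else '@' :: pvCore dct (d1 :: d2 :: rest)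
  | c :: rest => c :: pvCore dct rest

-- pure version of splitting on '@'
def pvSplit : List Char → List (List Char)
  | [] => [[]]
  | c :: rest =>
    if c = '@' then [] :: pvSplit rest
    else
      match pvSplit rest with
      | p :: ps => (c :: p) :: ps
      | [] => [[c]]

theorem pvSplit_ne_nil (cs : List Char) : pvSplit cs ≠ [] := by
  cases cs with
  | nil => simp [pvSplit]
  | cons c rest =>
    simp only [pvSplit]
    split
    · simp
    · split <;> simp

def pvConsHead (pre : List Char) : List (List Char) → List (List Char)
  | p :: ps => (pre ++ p) :: ps
  | [] => [pre]

-- characterisation of PySem's fueled split for the single-char separator '@'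
theorem splitOn_go_eq (fuel : Nat) :
    ∀ (l cur : List Char) (acc : List (List Char)), l.length ≤ fuel →
      PySem.Chars.splitOn.go ['@'] fuel l cur acc = acc.reverse ++ pvConsHead cur.reverse (pvSplit l) := by
  induction fuel with
  | zero =>
    intro l cur acc h
    have hl : l = [] := by cases l <;> simp_all
    subst hl
    rw [PySem.Chars.splitOn.go.eq_def]
    simp [pvSplit, pvConsHead]
  | succ f ih =>
    intro l cur acc h
    cases l with
    | nil =>
      rw [PySem.Chars.splitOn.go.eq_def]
      simp [pvSplit, pvConsHead]
    | cons c rest =>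
      obtain ⟨p, ps, hps⟩ := List.exists_cons_of_ne_nil (pvSplit_ne_nil rest)
      rw [PySem.Chars.splitOn.go.eq_def]
      simp only [List.isPrefixOf, Bool.and_true]
      by_cases hc : c = '@'
      · subst hc
        simp only [beq_self_eq_true, if_true, List.length_nil, List.length_cons, List.drop_succ_cons,
          List.drop_zero, Nat.zero_add]
        rw [ih rest [] (cur.reverse :: acc) (by simpa using h)]
        simp [pvSplit, pvConsHead, hps]
      · have hbc : ('@' == c) = false := beq_eq_false_iff_ne.mpr (fun e => hc e.symm)
        simp only [hbc]
        rw [ih rest (c :: cur) acc (by simpa using h)]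
        simp only [pvSplit, hc, if_false, hps, List.reverse_cons, pvConsHead, List.append_assoc,
          List.cons_append, List.nil_append]
        simp

theorem splitOn_eq_pvSplit (cs : List Char) :
    PySem.Chars.splitOn cs ['@'] = pvSplit cs := by
  obtain ⟨p, ps, hps⟩ := List.exists_cons_of_ne_nil (pvSplit_ne_nil cs)
  unfold PySem.Chars.splitOn
  rw [splitOn_go_eq (cs.length + 1) cs [] [] (by omega)]
  simp [pvConsHead, hps]

theorem isdigit_ne_at {d : Char} (h : PySem.Chars.isdigit d = true) : d ≠ '@' := by
  intro e; subst e; simp [PySem.Chars.isdigit] at h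

theorem pvSplit_two (d1 d2 : Char) (rest : List Char) (h1 : d1 ≠ '@') (h2 : d2 ≠ '@') :
    pvSplit (d1 :: d2 :: rest)
      = (d1 :: d2 :: (pvSplit rest).headD []) :: (pvSplit rest).tail := by
  obtain ⟨p, ps, hps⟩ := List.exists_cons_of_ne_nil (pvSplit_ne_nil rest)
  simp [pvSplit, h1, h2, hps]

theorem part_head_invalid (dct : List (String × String)) (rest : List Char)
    (h : ∀ d1 d2 t, rest = d1 :: d2 :: t → (PySem.Chars.isdigit d1 && PySem.Chars.isdigit d2) = false) :
    detokenizePart dct ((pvSplit rest).headD []) = '@' :: (pvSplit rest).headD [] := by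
  match rest with
  | [] => simp [pvSplit, detokenizePart]
  | [c1] =>
    by_cases hc1 : c1 = '@' <;> simp [pvSplit, detokenizePart, hc1]
  | c1 :: c2 :: rest2 =>
    have hd : (PySem.Chars.isdigit c1 && PySem.Chars.isdigit c2) = false := h c1 c2 rest2 rfl
    by_cases hc1 : c1 = '@'
    · simp [pvSplit, detokenizePart, hc1]
    · by_cases hc2 : c2 = '@'
      · simp [pvSplit, detokenizePart, hc1, hc2]
      · rw [pvSplit_two c1 c2 rest2 hc1 hc2]
        simp [detokenizePart, PySem.Chars.strIsdigit, hd]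

theorem core_eq_split (dct : List (String × String)) (cs : List Char) :
    pvCore dct cs
      = (pvSplit cs).headD [] ++ (((pvSplit cs).tail).map (detokenizePart dct)).flatten := by
  fun_induction pvCore dct cs with
  | case1 => simp [pvSplit]
  | case2 d1 d2 rest hdig ih =>
    have h1 : d1 ≠ '@' := isdigit_ne_at (by simp_all)
    have h2 : d2 ≠ '@' := isdigit_ne_at (by simp_all)
    obtain ⟨q, qs, hq⟩ := List.exists_cons_of_ne_nil (pvSplit_ne_nil rest)
    have hsp : pvSplit ('@' :: d1 :: d2 :: rest) = [] :: pvSplit (d1 :: d2 :: rest) := by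
      simp [pvSplit]
    rw [hsp, pvSplit_two d1 d2 rest h1 h2, hq]
    simp only [List.headD_cons, List.tail_cons, List.map_cons, List.flatten_cons,
      List.nil_append]
    rw [show detokenizePart dct (d1 :: d2 :: q) =
        (PySem.Dict.getD ⟨dct⟩ (String.ofList [d1, d2]) "").toList ++ q by
      simp [detokenizePart, PySem.Chars.strIsdigit, hdig]]
    rw [ih, hq]
    simp
  | case3 d1 d2 rest hdig ih =>
    have hsp : pvSplit ('@' :: d1 :: d2 :: rest) = [] :: pvSplit (d1 :: d2 :: rest) := by
      simp [pvSplit]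
    obtain ⟨q, qs, hq⟩ := List.exists_cons_of_ne_nil (pvSplit_ne_nil (d1 :: d2 :: rest))
    have hf := part_head_invalid dct (d1 :: d2 :: rest) (by
      intro a b t he
      injection he with e1 he; injection he with e2 _
      subst e1; subst e2
      simpa using hdig)
    rw [hq] at hf
    rw [hsp, hq]
    simp only [List.headD_cons, List.tail_cons, List.map_cons, List.flatten_cons,
      List.nil_append] at *
    rw [hf, ih, hq]
    simp
  | case4 c rest hne ih =>
    by_cases hc : c = '@'
    · subst hc
      have hrest : ∀ d1 d2 t, rest = d1 :: d2 :: t →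
          (PySem.Chars.isdigit d1 && PySem.Chars.isdigit d2) = false := by
        intro a b t he; exact absurd (hne a b t rfl he) (fun x => x)
      obtain ⟨q, qs, hq⟩ := List.exists_cons_of_ne_nil (pvSplit_ne_nil rest)
      have hf := part_head_invalid dct rest hrest
      rw [hq] at hf
      have hsp : pvSplit ('@' :: rest) = [] :: pvSplit rest := by simp [pvSplit]
      rw [hsp, hq]
      simp only [List.headD_cons, List.tail_cons, List.map_cons, List.flatten_cons,
        List.nil_append] at *
      rw [hf, ih, hq]
      simp
    · obtain ⟨q, qs, hq⟩ := List.exists_cons_of_ne_nil (pvSplit_ne_nil rest)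
      have hsp : pvSplit (c :: rest) = (c :: q) :: qs := by simp [pvSplit, hc, hq]
      rw [hsp, ih, hq]
      simp

theorem core_token (dct : List (String × String)) (d1 d2 : Char) (rest : List Char)
    (h : (PySem.Chars.isdigit d1 && PySem.Chars.isdigit d2) = true) :
    pvCore dct ('@' :: d1 :: d2 :: rest)
      = (PySem.Dict.getD ⟨dct⟩ (String.ofList [d1, d2]) "").toList ++ pvCore dct rest := by
  simp [pvCore, h]

theorem core_cons_not (dct : List (String × String)) (c : Char) (rest : List Char)
    (h : c = '@' → ∀ d1 d2 t, rest = d1 :: d2 :: t →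
      (PySem.Chars.isdigit d1 && PySem.Chars.isdigit d2) = false) :
    pvCore dct (c :: rest) = c :: pvCore dct rest := by
  by_cases hc : c = '@'
  · subst hc
    match rest with
    | [] => simp [pvCore]
    | [d] => simp [pvCore]
    | d1 :: d2 :: t => simp [pvCore, h rfl d1 d2 t rfl]
  · match rest with
    | [] => simp [pvCore]
    | [d] => simp [pvCore]
    | d1 :: d2 :: t => simp [pvCore, hc]

theorem loopA_eq (cs : List Char) (dct : List (String × String)) :
    ∀ (i : Nat) (out : List (List Char)),
      (detokenizeLoop cs dct i out).flatten = out.flatten ++ pvCore dct (cs.drop i) := by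
  have key : ∀ (n i : Nat) (out : List (List Char)), cs.length - i ≤ n →
      (detokenizeLoop cs dct i out).flatten = out.flatten ++ pvCore dct (cs.drop i) := by
    intro n
    induction n with
    | zero =>
      intro i out h
      rw [detokenizeLoop]
      have hi : ¬ i < cs.length := by omega
      rw [List.drop_eq_nil_of_le (by omega)]
      simp [hi, pvCore]
    | succ n ihn =>
      intro i out h
      rw [detokenizeLoop]
      by_cases hi : i < cs.length
      · simp only [hi, dif_pos]
        have hslice : PySem.List.slice cs (some ((i : Int) + 1)) (some ((i : Int) + 3))
            = (cs.drop (i + 1)).take 2 := by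
          rw [show ((i : Int) + 1) = ((i + 1 : Nat) : Int) by push_cast; ring,
            show ((i : Int) + 3) = ((i + 3 : Nat) : Int) by push_cast; ring,
            PySem.List.slice_natCast]
          congr 1
          omega
        by_cases hcond : (decide (i + 3 ≤ cs.length)
            && (PySem.List.pyGet? cs (i : Int) == some '@')
            && PySem.Chars.strIsdigit (PySem.List.slice cs (some ((i : Int) + 1)) (some ((i : Int) + 3)))) = true
        · rw [if_pos hcond]
          simp only [Bool.and_eq_true, decide_eq_true_eq, beq_iff_eq] at hcond
          obtain ⟨⟨hc1, hc2⟩, hc3⟩ := hcond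
          rw [PySem.List.pyGet?_natCast] at hc2
          have hgi : cs[i] = '@' := by
            have := List.getElem?_eq_getElem hi
            rw [this] at hc2
            exact Option.some_injective _ hc2
          have h1 : i + 1 < cs.length := by omega
          have h2 : i + 2 < cs.length := by omega
          have hd0 : cs.drop i = '@' :: cs.drop (i + 1) := by
            rw [List.drop_eq_getElem_cons hi, hgi]
          have hd1 : cs.drop (i + 1) = cs[i + 1] :: cs.drop (i + 2) := by
            rw [List.drop_eq_getElem_cons h1]
          have hd2 : cs.drop (i + 2) = cs[i + 2] :: cs.drop (i + 3) := by
            rw [List.drop_eq_getElem_cons h2]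
          rw [hslice, hd1, hd2] at hc3
          simp only [List.take_succ_cons, List.take_zero] at hc3
          have hdig : (PySem.Chars.isdigit cs[i + 1] && PySem.Chars.isdigit cs[i + 2]) = true := by
            simpa [PySem.Chars.strIsdigit] using hc3
          rw [ihn (i + 3) _ (by omega), hd0, hd1, hd2, core_token dct _ _ _ hdig, hslice, hd1, hd2]
          simp only [List.take_succ_cons, List.take_zero]
          split
          · next hrep =>
            simp only [List.isEmpty_iff] at hrep
            simp [hrep]
          · simp
        · rw [if_neg hcond]
          rw [ihn (i + 1) _ (by omega)]
          have hcore : pvCore dct (cs.drop i) = cs[i] :: pvCore dct (cs.drop (i + 1)) := by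
            rw [List.drop_eq_getElem_cons hi]
            apply core_cons_not
            intro hat d1 d2 t hdt
            by_contra hdig
            apply hcond
            have hlen : i + 3 ≤ cs.length := by
              have := congrArg List.length hdt
              simp only [List.length_drop, List.length_cons] at this
              omega
            simp only [Bool.and_eq_true, decide_eq_true_eq, beq_iff_eq]
            refine ⟨⟨hlen, ?_⟩, ?_⟩
            · rw [PySem.List.pyGet?_natCast, List.getElem?_eq_getElem hi, hat]
            · rw [hslice, hdt]
              simp only [List.take_succ_cons, List.take_zero]
              simp only [Bool.not_eq_false] at hdig
              simpa [PySem.Chars.strIsdigit] using hdig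
          rw [hcore]
          simp
      · rw [List.drop_eq_nil_of_le (by omega)]
        simp [hi, pvCore]
  exact fun i out => key (cs.length - i) i out le_rfl

-- ===== VERDICT (by name: the statement is the Claim_ definition above) =====
theorem detokenize_py_spec : Claim_equal_detokenize_py := by
  unfold Claim_equal_detokenize_py Spec_detokenize_py
  intro text dct _
  unfold detokenize_py detokenize_py_alt
  rw [splitOn_eq_pvSplit]
  by_cases h : text.toList.isEmpty
  · have he : text.toList = [] := by simpa using h
    rw [if_pos h, he]
    simp [pvSplit]
  · rw [if_neg h, loopA_eq text.toList dct 0 []]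
    dsimp only
    obtain ⟨q, qs, hq⟩ := List.exists_cons_of_ne_nil (pvSplit_ne_nil text.toList)
    simp only [hq, List.drop_one, List.flatten_nil, List.nil_append, List.drop_zero,
      List.headD_cons, List.tail_cons, List.flatten_cons]
    rw [show pvCore dct text.toList
        = (pvSplit text.toList).headD [] ++ (((pvSplit text.toList).tail).map (detokenizePart dct)).flatten
        from core_eq_split dct text.toList, hq]
    simp
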